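-- pv_equiv track=rewrite | github.com/mosesletting19/python-toy-problems | challenge1.py | solution
-- ===== SOURCE A (Python) =====
-- def solution(A):
--     N = len(A)
--     target_bricks = 10
--
--     # Calculate the total number of bricks needed in all boxes
--     total_bricks = sum(A)
--
--     # Calculate the total number of moves needed
--     total_moves = 0
--     missing_bricks = target_bricks * N - total_bricks
--
--     if missing_bricks % N != 0:
--         # If the total number of bricks needed cannot be distributed equally
--         return -1
--     else:
--         bricks_per_box = missing_bricks // N
--         for bricks_in_box in A:
--             bricks_needed = target_bricks - bricks_in_box + bricks_per_box
--             if bricks_needed < 0: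
--                 # If it's not possible to distribute the bricks
--                 return -1
--             total_moves += abs(bricks_needed)
--
--     return total_moves
-- ===== SOURCE B (Python) =====
-- def solution(A):
--     N = len(A)
--     missing = 10 * N - sum(A)
--     if missing % N != 0:
--         return -1
--     if max(A) > 10 + missing // N:
--         return -1
--     return 2 * missing
-- ===== Notes on version B (the rewrite author's own statement) =====
-- stated objective: simpler
-- what changed: replaces the per-box accumulation loop by the closed form 2*missing plus a single max(A) comparison against the common final level
import Mathlib
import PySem

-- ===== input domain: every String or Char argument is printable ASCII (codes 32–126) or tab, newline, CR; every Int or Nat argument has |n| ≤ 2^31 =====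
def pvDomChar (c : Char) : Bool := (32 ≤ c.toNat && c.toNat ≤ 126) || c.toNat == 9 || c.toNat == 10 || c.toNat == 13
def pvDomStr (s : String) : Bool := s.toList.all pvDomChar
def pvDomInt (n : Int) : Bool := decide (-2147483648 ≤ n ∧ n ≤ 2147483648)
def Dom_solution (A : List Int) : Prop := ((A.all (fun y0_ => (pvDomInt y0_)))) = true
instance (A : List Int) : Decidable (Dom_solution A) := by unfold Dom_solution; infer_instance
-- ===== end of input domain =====

-- B replaces A's per-box accumulation loop by the closed form 2*missing plus one max(A) comparison (objective: simpler).


-- ===== PORT A =====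
-- the for-loop with early return -1, accumulating total_moves
def solutionLoop (q : Int) (acc : Int) : List Int → Int
  | [] => acc
  | a :: rest =>
      let need := 10 - a + q
      if need < 0 then -1 else solutionLoop q (acc + |need|) rest

def solution (A : List Int) : Int :=
  let N : Int := A.length
  let totalBricks := A.sum
  let missing := 10 * N - totalBricks
  if PySem.Int.mod missing N ≠ 0 then -1
  else solutionLoop (PySem.Int.floordiv missing N) 0 A

-- ===== PORT B =====
def solution_alt (A : List Int) : Int :=
  let N : Int := A.length
  let missing := 10 * N - A.sum
  if PySem.Int.mod missing N ≠ 0 then -1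
  else
    match PySem.List.max? A (fun y => y) with
    | none => -1   -- unreachable under Pre_ (A ≠ []); Python's max([]) raises
    | some m => if m > 10 + PySem.Int.floordiv missing N then -1 else 2 * missing

-- ===== PRECONDITION & SPEC =====
-- Pre_ excludes only the empty list, on which both Pythons raise ZeroDivisionError at 'missing % N'.
def Pre_solution (A : List Int) : Prop := A ≠ []
instance (A : List Int) : Decidable (Pre_solution A) := by unfold Pre_solution; infer_instance
def pvWitness_solution : List Int := [7, 13, 10]

def Spec_solution (A : List Int) (out : Int) : Prop := out = solution_alt A
instance (A : List Int) (out : Int) : Decidable (Spec_solution A out) := by unfold Spec_solution; infer_instance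

-- ===== CLAIM (what is proved, stated in full; the proofs are below) =====
def Claim_equal_solution : Prop := ∀ (A : List Int), Dom_solution A → Pre_solution A → Spec_solution A (solution A)

-- ===== LEMMAS AND PROOFS =====

-- characterisation of A's loop: early -1 iff some box exceeds the final level, else closed-form sum
theorem solutionLoop_char (q : Int) (L : List Int) (acc : Int) :
    solutionLoop q acc L =
      if ∃ a ∈ L, 10 - a + q < 0 then -1
      else acc + ((10 + q) * L.length - L.sum) := by
  induction L generalizing acc with
  | nil => simp [solutionLoop]
  | cons a t ih =>
      simp only [solutionLoop]
      by_cases h : 10 - a + q < 0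
      · simp [h]
      · rw [if_neg h, ih]
        have habs : |10 - a + q| = 10 - a + q := abs_of_nonneg (by omega)
        by_cases ht : ∃ x ∈ t, 10 - x + q < 0
        · have : ∃ x ∈ a :: t, 10 - x + q < 0 := by
            obtain ⟨x, hx, hlt⟩ := ht; exact ⟨x, List.mem_cons_of_mem _ hx, hlt⟩
          rw [if_pos ht, if_pos this]
        · have : ¬ ∃ x ∈ a :: t, 10 - x + q < 0 := by
            rintro ⟨x, hx, hlt⟩
            rcases List.mem_cons.1 hx with rfl | hx
            · exact h hlt
            · exact ht ⟨x, hx, hlt⟩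
          rw [if_neg ht, if_neg this]
          simp only [List.sum_cons, List.length_cons]
          push_cast
          rw [habs]
          ring

-- (proof of the verdict)
theorem solution_spec : Claim_equal_solution := by
  intro A _ hpre
  unfold Spec_solution solution solution_alt
  simp only []
  set N : Int := (A.length : Int) with hN
  set missing : Int := 10 * N - A.sum with hm
  by_cases hmod : PySem.Int.mod missing N ≠ 0
  · rw [if_pos hmod, if_pos hmod]
  · rw [if_neg hmod, if_neg hmod]
    push Not at hmod
    obtain ⟨x, t, rfl⟩ := List.exists_cons_of_ne_nil hpre
    have hmax : PySem.List.max? (x :: t) (fun y => y) = some (t.foldl max x) :=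
      PySem.List.max?_id_cons x t
    rw [hmax]
    simp only []
    set q := PySem.Int.floordiv missing N with hq
    set m := t.foldl max x with hM
    have hNq : q * N + 0 = missing := by
      have := PySem.Int.floordiv_mul_add_mod missing N
      rw [hmod] at this; rw [hq]; omega
    have hmem : m ∈ x :: t := by
      have := PySem.List.max?_mem (xs := x :: t) (key := fun y => y) hmax
      exact this
    have hub : ∀ y ∈ x :: t, y ≤ m := by
      intro y hy
      exact PySem.List.max?_isMax (xs := x :: t) (key := fun y => y) hmax y hy
    rw [solutionLoop_char]
    by_cases hbig : m > 10 + q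
    · rw [if_pos hbig, if_pos ?_]
      exact ⟨m, hmem, by omega⟩
    · rw [if_neg hbig, if_neg ?_]
      · have hsum : ((10 + q) * (x :: t).length - (x :: t).sum : Int) = 2 * missing := by
          have hlen : ((x :: t).length : Int) = N := hN.symm
          rw [hlen]
          have : (10 + q) * N = 10 * N + q * N := by ring
          omega
        rw [hsum]; omega
      · rintro ⟨y, hy, hlt⟩
        have := hub y hy
        omega

-- ===== VERDICT (by name: the statement is the Claim_ definition above) =====
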